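-- pv_equiv track=rewrite | github.com/benjaminkost/chess-scoresheet-digitalization-service | src/classes_for_steps/preprocessing_strategy.py | move_every_third_and_fourth_to_end
-- ===== SOURCE A (Python) =====
-- def move_every_third_and_fourth_to_end(focal_points):
--     result = []
--     to_move = []
--
--     for i, item in enumerate(focal_points):
--         # Jeder 3. (Index 2, 6, 10, ...) oder 4. (Index 3, 7, 11, ...)
--         if (i % 4 == 2) or (i % 4 == 3):
--             to_move.append(item)
--         else:
--             result.append(item)
--
--     result.extend(to_move)
--     return result
-- ===== SOURCE B (Python) =====
-- def move_every_third_and_fourth_to_end(focal_points):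
--     # Block-structured pass: for each group of 4, keep the first two elements
--     # and collect the last two for the end; slicing truncates a short final block.
--     result = []
--     to_move = []
--     n = len(focal_points)
--     i = 0
--     while i < n:
--         result += focal_points[i:i + 2]
--         to_move += focal_points[i + 2:i + 4]
--         i += 4
--     return result + to_move
-- ===== Notes on version B (the rewrite author's own statement) =====
-- stated objective: alternative
-- what changed: Replaces the per-element enumerate + modulo-4 test with two appended lists by a blockwise recursion over groups of four that splits each block into its first two and last two elements by slicing.
import Mathlib
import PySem

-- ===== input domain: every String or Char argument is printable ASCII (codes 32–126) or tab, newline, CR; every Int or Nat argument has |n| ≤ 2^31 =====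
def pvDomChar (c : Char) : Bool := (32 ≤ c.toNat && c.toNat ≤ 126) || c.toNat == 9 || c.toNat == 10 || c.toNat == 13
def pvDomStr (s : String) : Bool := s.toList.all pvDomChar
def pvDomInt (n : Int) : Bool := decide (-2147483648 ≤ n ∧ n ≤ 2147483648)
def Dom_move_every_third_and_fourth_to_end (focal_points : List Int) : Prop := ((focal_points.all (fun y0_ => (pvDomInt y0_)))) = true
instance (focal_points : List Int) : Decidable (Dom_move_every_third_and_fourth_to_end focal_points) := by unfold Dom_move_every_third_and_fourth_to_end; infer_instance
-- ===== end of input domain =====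

-- B replaces A's per-element enumerate + modulo-4 partition by a block-structured
-- slicing loop over groups of four (objective: alternative decomposition).

-- ===== PORT A =====
-- for i, item in enumerate(focal_points): append to to_move if i%4 in {2,3}, else to result
def move_every_third_and_fourth_to_end (focal_points : List Int) : List Int :=
  let st := (PySem.List.enumerate focal_points).foldl
    (fun (st : List Int × List Int) (p : Int × Int) =>
      if p.1 % 4 = 2 ∨ p.1 % 4 = 3 then (st.1, st.2 ++ [p.2]) else (st.1 ++ [p.2], st.2))
    ([], [])
  st.1 ++ st.2

-- ===== PORT B =====
-- 'while i < n: result += fp[i:i+2]; to_move += fp[i+2:i+4]; i += 4'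
def pvAltLoop (fp : List Int) (i : Int) (r m : List Int) : List Int × List Int :=
  if _h : i < (fp.length : Int) then
    pvAltLoop fp (i + 4)
      (r ++ PySem.List.slice fp (some i) (some (i + 2)))
      (m ++ PySem.List.slice fp (some (i + 2)) (some (i + 4)))
  else (r, m)
termination_by (fp.length - i).toNat
decreasing_by omega

def move_every_third_and_fourth_to_end_alt (focal_points : List Int) : List Int :=
  let st := pvAltLoop focal_points 0 [] []
  st.1 ++ st.2

-- ===== PRECONDITION & SPEC =====
def Spec_move_every_third_and_fourth_to_end (focal_points : List Int) (out : List Int) : Prop := out = move_every_third_and_fourth_to_end_alt focal_points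
instance (focal_points : List Int) (out : List Int) : Decidable (Spec_move_every_third_and_fourth_to_end focal_points out) := by unfold Spec_move_every_third_and_fourth_to_end; infer_instance

-- ===== CLAIM (what is proved, stated in full; the proofs are below) =====
def Claim_equal_move_every_third_and_fourth_to_end : Prop := ∀ (focal_points : List Int), Dom_move_every_third_and_fourth_to_end focal_points → Spec_move_every_third_and_fourth_to_end focal_points (move_every_third_and_fourth_to_end focal_points)

-- ===== LEMMAS AND PROOFS =====

-- The common partition both loops compute: blocks of four, first two kept, last two moved.
def pvAltGo : List Int → List Int × List Int
  | [] => ([], [])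
  | [a] => ([a], [])
  | [a, b] => ([a, b], [])
  | [a, b, c] => ([a, b], [c])
  | a :: b :: c :: d :: rest =>
    let p := pvAltGo rest
    (a :: b :: p.1, c :: d :: p.2)

-- A's loop, abstracted: the partition it computes from start index i.
def pvGoA (i : Int) : List Int → List Int × List Int
  | [] => ([], [])
  | x :: xs =>
    let p := pvGoA (i + 1) xs
    if i % 4 = 2 ∨ i % 4 = 3 then (p.1, x :: p.2) else (x :: p.1, p.2)

theorem pvFoldA (xs : List Int) (i : Int) (r m : List Int) :
    (PySem.List.enumerate xs i).foldl
      (fun (st : List Int × List Int) (p : Int × Int) =>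
        if p.1 % 4 = 2 ∨ p.1 % 4 = 3 then (st.1, st.2 ++ [p.2]) else (st.1 ++ [p.2], st.2))
      (r, m)
    = (r ++ (pvGoA i xs).1, m ++ (pvGoA i xs).2) := by
  induction xs generalizing i r m with
  | nil => simp [pvGoA, PySem.List.enumerate_nil]
  | cons x xs ih =>
    simp only [PySem.List.enumerate_cons, List.foldl_cons, pvGoA]
    by_cases h : i % 4 = 2 ∨ i % 4 = 3
    · simp [h, ih]
    · simp [h, ih]

theorem pvGoA_eq_alt (xs : List Int) (i : Int) (h : i % 4 = 0) : pvGoA i xs = pvAltGo xs := by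
  induction xs using pvAltGo.induct generalizing i with
  | case1 => simp [pvGoA, pvAltGo]
  | case2 a =>
    simp [pvGoA, pvAltGo, h]
  | case3 a b =>
    have h1 : (i + 1) % 4 = 1 := by omega
    simp [pvGoA, pvAltGo, h, h1]
  | case4 a b c =>
    have h1 : (i + 1) % 4 = 1 := by omega
    have h2 : (i + 1 + 1) % 4 = 2 := by omega
    simp [pvGoA, pvAltGo, h, h1, h2]
  | case5 a b c d rest ih =>
    have h1 : (i + 1) % 4 = 1 := by omega
    have h2 : (i + 1 + 1) % 4 = 2 := by omega
    have h3 : (i + 1 + 1 + 1) % 4 = 3 := by omega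
    have h4 : (i + 1 + 1 + 1 + 1) % 4 = 0 := by omega
    simp [pvGoA, pvAltGo, h, h1, h2, h3, ih _ h4]

theorem pvSliceA (pre xs : List Int) :
    PySem.List.slice (pre ++ xs) (some ((pre.length : Nat) : Int)) (some (((pre.length : Nat) : Int) + 2)) = xs.take 2 := by
  have e : ((pre.length : Nat) : Int) + 2 = (((pre.length + 2 : Nat)) : Int) := by push_cast; ring
  rw [e, PySem.List.slice_natCast]
  simp

theorem pvSliceB (pre xs : List Int) :
    PySem.List.slice (pre ++ xs) (some (((pre.length : Nat) : Int) + 2)) (some (((pre.length : Nat) : Int) + 4)) = (xs.drop 2).take 2 := by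
  have e2 : ((pre.length : Nat) : Int) + 2 = (((pre.length + 2 : Nat)) : Int) := by push_cast; ring
  have e4 : ((pre.length : Nat) : Int) + 4 = (((pre.length + 4 : Nat)) : Int) := by push_cast; ring
  rw [e2, e4, PySem.List.slice_natCast]
  have hd : (pre ++ xs).drop (pre.length + 2) = xs.drop 2 := by
    rw [List.drop_append]
    simp
  rw [hd]
  congr 1
  omega

theorem pvAltLoop_eq (xs : List Int) : ∀ (pre r m : List Int),
    pvAltLoop (pre ++ xs) (pre.length : Int) r m
      = (r ++ (pvAltGo xs).1, m ++ (pvAltGo xs).2) := by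
  induction xs using pvAltGo.induct with
  | case1 =>
    intro pre r m
    rw [pvAltLoop]
    simp [pvAltGo]
  | case2 a =>
    intro pre r m
    rw [pvAltLoop]
    have hlt : (pre.length : Int) < ((pre ++ [a]).length : Int) := by
      simp only [List.length_append, List.length_cons, List.length_nil]; push_cast; omega
    rw [dif_pos hlt, pvSliceA, pvSliceB, pvAltLoop]
    have hge : ¬ ((pre.length : Int) + 4 < ((pre ++ [a]).length : Int)) := by
      simp only [List.length_append, List.length_cons, List.length_nil]; push_cast; omega
    rw [dif_neg hge]
    simp [pvAltGo]
  | case3 a b =>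
    intro pre r m
    rw [pvAltLoop]
    have hlt : (pre.length : Int) < ((pre ++ [a, b]).length : Int) := by
      simp only [List.length_append, List.length_cons, List.length_nil]; push_cast; omega
    rw [dif_pos hlt, pvSliceA, pvSliceB, pvAltLoop]
    have hge : ¬ ((pre.length : Int) + 4 < ((pre ++ [a, b]).length : Int)) := by
      simp only [List.length_append, List.length_cons, List.length_nil]; push_cast; omega
    rw [dif_neg hge]
    simp [pvAltGo]
  | case4 a b c =>
    intro pre r m
    rw [pvAltLoop]
    have hlt : (pre.length : Int) < ((pre ++ [a, b, c]).length : Int) := by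
      simp only [List.length_append, List.length_cons, List.length_nil]; push_cast; omega
    rw [dif_pos hlt, pvSliceA, pvSliceB, pvAltLoop]
    have hge : ¬ ((pre.length : Int) + 4 < ((pre ++ [a, b, c]).length : Int)) := by
      simp only [List.length_append, List.length_cons, List.length_nil]; push_cast; omega
    rw [dif_neg hge]
    simp [pvAltGo]
  | case5 a b c d rest ih =>
    intro pre r m
    rw [pvAltLoop]
    have hlt : (pre.length : Int) < ((pre ++ (a :: b :: c :: d :: rest)).length : Int) := by
      simp only [List.length_append, List.length_cons]; push_cast; omega
    rw [dif_pos hlt, pvSliceA, pvSliceB]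
    have e4 : (pre.length : Int) + 4 = (((pre ++ [a, b, c, d]).length : Nat) : Int) := by
      simp only [List.length_append, List.length_cons, List.length_nil]; push_cast; ring
    have hsplit : pre ++ (a :: b :: c :: d :: rest) = (pre ++ [a, b, c, d]) ++ rest := by simp
    rw [e4, hsplit, ih]
    simp [pvAltGo]

-- ===== VERDICT (by name: the statement is the Claim_ definition above) =====
theorem move_every_third_and_fourth_to_end_spec : Claim_equal_move_every_third_and_fourth_to_end := by
  intro xs _
  show _ = _
  have hB := pvAltLoop_eq xs [] [] []
  simp only [List.nil_append, List.length_nil, Nat.cast_zero] at hB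
  simp [move_every_third_and_fourth_to_end, move_every_third_and_fourth_to_end_alt,
    pvFoldA, pvGoA_eq_alt xs 0 rfl, hB]
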